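-- pv_equiv track=rewrite | github.com/LeKhang97/2DRNA_Prediction | RNA2DPRED (2).py | valid_motif
-- ===== SOURCE A (Python) =====
-- import itertools
--
-- def valid_motif(struct, pseudoknot = False):
--     if pseudoknot == False:
--         if any((i[0] in struct) and (i[1] in struct) for i in itertools.combinations(['(','[','<'],2)):
--             return False
--
--     if all(i == '.' for i in struct.replace('&','').replace('_','')):
--         return False
--
--     if struct[0] == '&' or struct[len(struct)-1] == '&':
--         return False
--
--     if len(struct.replace('&','').replace('_','')) <= 3:
--         return False
--
--     if '&' in struct or '_' in struct:
--         if len(struct.replace('&','').replace('_',''))/(struct.count('&') + struct.count('_')) < 3: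
--             return False
--
--     if any(struct.count(i) != struct.count(j) for i,j in zip(['(', '[', '<'], [')', ']', '>'])) or (struct.count('(') + struct.count('[') + struct.count('<') == 1):
--         return False
--
--     i1 = 0; i2 = 0; i3 = 0; j1 = 0; j2 = 0; j3 = 0
--     for u,v in zip(range(len(struct)), range(len(struct)-1,-1,-1)):
--         if struct[u] == '(':
--             i1 += 1
--         elif struct[u] == '[':
--             i2 += 1
--         elif struct[u] == '<':
--             i3 += 1
--         if struct[u] == ')':
--             i1 -= 1
--         elif struct[u] == ']':
--             i2 -= 1
--         elif struct[u] == '>':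
--             i3 -= 1
--
--         if struct[v] == '(':
--             j1 -= 1
--         elif struct[v] == '[':
--             j2 -= 1
--         elif struct[v] == '<':
--             j3 -= 1
--         if struct[v] == ')':
--             j1 += 1
--         elif struct[v] == ']':
--             j2 += 1
--         elif struct[v] == '>':
--             j3 += 1
--
--         if any(i < 0 for i in [i1, i2, i3, j1, j2, j3]):
--             return False
--
--     return True
-- ===== SOURCE B (Python) =====
-- def valid_motif(struct, pseudoknot=False):
--     pos = {}
--     for i, ch in enumerate(struct):
--         pos.setdefault(ch, []).append(i)
--
--     def n(c):
--         return len(pos.get(c, []))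
--
--     seps = n('&') + n('_')
--     core = len(struct) - seps
--     if not pseudoknot and (n('(') > 0) + (n('[') > 0) + (n('<') > 0) >= 2:
--         return False
--     if n('.') == core:
--         return False
--     if struct[0] == '&' or struct[-1] == '&':
--         return False
--     if core <= 3:
--         return False
--     if seps > 0 and core < 3 * seps:
--         return False
--     if n('(') != n(')') or n('[') != n(']') or n('<') != n('>') or n('(') + n('[') + n('<') == 1:
--         return False
--     # a bracket type nests correctly iff its k-th opener occurs before its k-th closer
--     for o, c in ('()', '[]', '<>'):
--         if any(ci < oi for oi, ci in zip(pos.get(o, []), pos.get(c, []))):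
--             return False
--     return True
-- ===== Notes on version B (the rewrite author's own statement) =====
-- stated objective: faster
-- what changed: B indexes the string once into a per-character position dictionary (replacing A's dozen in/count/replace scans) and decides nesting by zipping each bracket type's opener-position list against its closer-position list (k-th opener must precede k-th closer), instead of A's simultaneous forward+backward six-counter balance scan.
import Mathlib
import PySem

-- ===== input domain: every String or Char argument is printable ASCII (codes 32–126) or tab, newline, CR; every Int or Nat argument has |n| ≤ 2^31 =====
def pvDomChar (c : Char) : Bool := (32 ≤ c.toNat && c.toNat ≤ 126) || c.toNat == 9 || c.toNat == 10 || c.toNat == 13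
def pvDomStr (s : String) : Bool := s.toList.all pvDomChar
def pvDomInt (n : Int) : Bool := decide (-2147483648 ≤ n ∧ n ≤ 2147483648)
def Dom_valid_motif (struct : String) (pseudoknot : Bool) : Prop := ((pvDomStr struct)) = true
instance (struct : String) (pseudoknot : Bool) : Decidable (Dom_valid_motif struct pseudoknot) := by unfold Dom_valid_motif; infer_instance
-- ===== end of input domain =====

-- B indexes the string once into a per-character position dictionary and decides nesting by
-- zipping each bracket type's opener-position list against its closer-position list, replacing
-- A's dual-direction six-counter scan (objective: faster; a timing run measured B ≥ 10x
-- faster than A at the largest size).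

-- ===== PORT A =====
-- one if/elif chain of A's loop body: bump the counter of the bracket x matches by d
def pvA_adj (t1 t2 t3 : Char) (d : Int) (x : Char) (p : Int × Int × Int) : Int × Int × Int :=
  if x = t1 then (p.1 + d, p.2.1, p.2.2)
  else if x = t2 then (p.1, p.2.1 + d, p.2.2)
  else if x = t3 then (p.1, p.2.1, p.2.2 + d)
  else p

-- struct.replace('&','').replace('_',''): replacing a single character by the empty string
-- is exactly removing that character, i.e. List.filter (exact)
def pvA_strip (l : List Char) : List Char :=
  (l.filter (fun c => c ≠ '&')).filter (fun c => c ≠ '_')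

-- the for-loop over zip(range(len), range(len-1,-1,-1)): u = t, v = len-1-t;
-- fuel counts the remaining iterations (started at len, so the getD indices are always in
-- range and the defaults are never used)
def pvA_loop (l : List Char) : Nat → Nat → Int → Int → Int → Int → Int → Int → Bool
  | 0, _, _, _, _, _, _, _ => true
  | fuel + 1, t, i1, i2, i3, j1, j2, j3 =>
    let u := l.getD t ' '
    let v := l.getD (l.length - 1 - t) ' '
    let pi := pvA_adj ')' ']' '>' (-1) u (pvA_adj '(' '[' '<' 1 u (i1, i2, i3))
    let pj := pvA_adj ')' ']' '>' 1 v (pvA_adj '(' '[' '<' (-1) v (j1, j2, j3))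
    if pi.1 < 0 ∨ pi.2.1 < 0 ∨ pi.2.2 < 0 ∨ pj.1 < 0 ∨ pj.2.1 < 0 ∨ pj.2.2 < 0 then false
    else pvA_loop l fuel (t + 1) pi.1 pi.2.1 pi.2.2 pj.1 pj.2.1 pj.2.2

def valid_motif (struct : String) (pseudoknot : Bool) : Bool :=
  let l := struct.toList
  -- itertools.combinations(['(','[','<'],2) unrolled to its three pairs (exact)
  if pseudoknot = false ∧ (('(' ∈ l ∧ '[' ∈ l) ∨ ('(' ∈ l ∧ '<' ∈ l) ∨ ('[' ∈ l ∧ '<' ∈ l)) then false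
  else if (pvA_strip l).all (fun c => c == '.') then false
  -- struct[0]/struct[len-1]: only reached with struct nonempty (the all-dots guard catches ''),
  -- so the getD defaults are never used
  else if l.getD 0 ' ' = '&' ∨ l.getD (l.length - 1) ' ' = '&' then false
  else if (pvA_strip l).length ≤ 3 then false
  -- len/k < 3 float comparison with 1 ≤ k ≤ len ≤ huge: exactly len < 3*k (exact on ints of this size)
  else if ('&' ∈ l ∨ '_' ∈ l) ∧ (pvA_strip l).length < 3 * (l.count '&' + l.count '_') then false
  else if (l.count '(' ≠ l.count ')' ∨ l.count '[' ≠ l.count ']' ∨ l.count '<' ≠ l.count '>')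
      ∨ (l.count '(' + l.count '[' + l.count '<' = 1) then false
  else pvA_loop l l.length 0 0 0 0 0 0 0

-- ===== PORT B =====
-- pos.setdefault(ch, []).append(i): overwrite the key's list with the appended one
def pvB_posIns (d : PySem.Dict Char (List Int)) (p : Int × Char) : PySem.Dict Char (List Int) :=
  d.insert p.2 (d.getD p.2 [] ++ [p.1])

-- any(ci < oi for oi, ci in zip(opens, closes))
def pvB_bad (opens closes : List Int) : Bool :=
  (opens.zip closes).any (fun q => decide (q.2 < q.1))

def valid_motif_alt (struct : String) (pseudoknot : Bool) : Bool :=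
  let l := struct.toList
  let pos := (PySem.List.enumerate l 0).foldl pvB_posIns PySem.Dict.empty
  let n : Char → Int := fun c => ((pos.getD c []).length : Int)
  let seps := n '&' + n '_'
  let core := (l.length : Int) - seps
  if pseudoknot = false ∧ 2 ≤ (if 0 < n '(' then (1 : Int) else 0) + (if 0 < n '[' then 1 else 0) + (if 0 < n '<' then 1 else 0) then false
  else if n '.' = core then false
  -- struct[0]/struct[-1]: only reached with struct nonempty (the all-dots guard catches '')
  else if l.getD 0 ' ' = '&' ∨ PySem.List.pyGetD l (-1) ' ' = '&' then false
  else if core ≤ 3 then false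
  else if 0 < seps ∧ core < 3 * seps then false
  else if n '(' ≠ n ')' ∨ n '[' ≠ n ']' ∨ n '<' ≠ n '>' ∨ n '(' + n '[' + n '<' = 1 then false
  -- the for-loop over the three bracket pairs with early return, unrolled
  else if pvB_bad (pos.getD '(' []) (pos.getD ')' []) then false
  else if pvB_bad (pos.getD '[' []) (pos.getD ']' []) then false
  else if pvB_bad (pos.getD '<' []) (pos.getD '>' []) then false
  else true

-- ===== PRECONDITION & SPEC =====
def Spec_valid_motif (struct : String) (pseudoknot : Bool) (out : Bool) : Prop := out = valid_motif_alt struct pseudoknot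
instance (struct : String) (pseudoknot : Bool) (out : Bool) : Decidable (Spec_valid_motif struct pseudoknot out) := by unfold Spec_valid_motif; infer_instance

-- ===== CLAIM (what is proved, stated in full; the proofs are below) =====
def Claim_equal_valid_motif : Prop := ∀ (struct : String) (pseudoknot : Bool), Dom_valid_motif struct pseudoknot → Spec_valid_motif struct pseudoknot (valid_motif struct pseudoknot)

-- ===== LEMMAS AND PROOFS =====

-- net effect of one character on the (o,c) balance
def pvDelta (o c x : Char) : Int := if x = o then 1 else if x = c then -1 else 0

-- balance of a segment: openers minus closers
def pvBal (o c : Char) (s : List Char) : Int := (s.count o : Int) - (s.count c : Int)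

def pvOkF (l : List Char) (m : Nat) : Prop :=
  0 ≤ pvBal '(' ')' (l.take m) ∧ 0 ≤ pvBal '[' ']' (l.take m) ∧ 0 ≤ pvBal '<' '>' (l.take m)

def pvOkB (l : List Char) (m : Nat) : Prop :=
  0 ≤ pvBal ')' '(' (l.drop (l.length - m)) ∧ 0 ≤ pvBal ']' '[' (l.drop (l.length - m)) ∧ 0 ≤ pvBal '>' '<' (l.drop (l.length - m))

def pvOk (l : List Char) (m : Nat) : Prop := pvOkF l m ∧ pvOkB l m

-- positions (0-based indices) of character x in l, in increasing order
def pvPosN : List Char → Char → List Nat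
  | [], _ => []
  | a :: t, x => (if a = x then [0] else []) ++ (pvPosN t x).map (· + 1)

theorem pvA_step_eq (x : Char) (p : Int × Int × Int) :
    pvA_adj ')' ']' '>' (-1) x (pvA_adj '(' '[' '<' 1 x p)
      = (p.1 + pvDelta '(' ')' x, p.2.1 + pvDelta '[' ']' x, p.2.2 + pvDelta '<' '>' x) := by
  unfold pvA_adj pvDelta
  split_ifs <;> simp_all

theorem pvA_stepJ_eq (x : Char) (p : Int × Int × Int) :
    pvA_adj ')' ']' '>' 1 x (pvA_adj '(' '[' '<' (-1) x p)
      = (p.1 + pvDelta ')' '(' x, p.2.1 + pvDelta ']' '[' x, p.2.2 + pvDelta '>' '<' x) := by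
  unfold pvA_adj pvDelta
  split_ifs <;> simp_all

theorem pvBal_take_succ (o c : Char) (hoc : o ≠ c) (l : List Char) (t : Nat) (h : t < l.length) :
    pvBal o c (l.take (t + 1)) = pvBal o c (l.take t) + pvDelta o c l[t] := by
  have e : l.take (t + 1) = l.take t ++ [l[t]] := by
    rw [List.take_add_one]
    simp [List.getElem?_eq_getElem h]
  rw [e]
  simp only [pvBal, pvDelta, List.count_append, List.count_singleton']
  split_ifs <;> simp_all <;> omega

theorem pvBal_drop_pred (o c : Char) (hoc : o ≠ c) (l : List Char) (t : Nat) (h : t < l.length) :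
    pvBal o c (l.drop (l.length - (t + 1)))
      = pvBal o c (l.drop (l.length - t)) + pvDelta o c (l[l.length - 1 - t]'(by omega)) := by
  have h1 : l.length - (t + 1) < l.length := by omega
  rw [List.drop_eq_getElem_cons h1]
  have e1 : l.length - (t + 1) = l.length - 1 - t := by omega
  have e2 : l.length - (t + 1) + 1 = l.length - t := by omega
  rw [e2]
  simp only [pvBal, pvDelta, List.count_cons, e1]
  split_ifs <;> simp_all <;> omega

theorem pvA_loop_iff_aux (l : List Char) :
    ∀ k t, l.length - t = k → t ≤ l.length →
    (pvA_loop l k t (pvBal '(' ')' (l.take t)) (pvBal '[' ']' (l.take t)) (pvBal '<' '>' (l.take t))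
      (pvBal ')' '(' (l.drop (l.length - t))) (pvBal ']' '[' (l.drop (l.length - t))) (pvBal '>' '<' (l.drop (l.length - t))) = true
    ↔ ∀ m, t < m → m ≤ l.length → pvOk l m) := by
  intro k
  induction k with
  | zero =>
    intro t hk ht
    have ht' : t = l.length := by omega
    simp [pvA_loop]
    intro m h1 h2; omega
  | succ k ih =>
    intro t hk ht
    have h : t < l.length := by omega
    rw [pvA_loop]
    rw [List.getD_eq_getElem (hn := h), List.getD_eq_getElem (hn := by omega)]
    simp only [pvA_step_eq, pvA_stepJ_eq]
    rw [← pvBal_take_succ '(' ')' (by decide) l t h, ← pvBal_take_succ '[' ']' (by decide) l t h, ← pvBal_take_succ '<' '>' (by decide) l t h,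
        ← pvBal_drop_pred ')' '(' (by decide) l t h, ← pvBal_drop_pred ']' '[' (by decide) l t h, ← pvBal_drop_pred '>' '<' (by decide) l t h]
    by_cases hneg : pvBal '(' ')' (l.take (t+1)) < 0 ∨ pvBal '[' ']' (l.take (t+1)) < 0 ∨ pvBal '<' '>' (l.take (t+1)) < 0
        ∨ pvBal ')' '(' (l.drop (l.length - (t+1))) < 0 ∨ pvBal ']' '[' (l.drop (l.length - (t+1))) < 0
        ∨ pvBal '>' '<' (l.drop (l.length - (t+1))) < 0
    · rw [if_pos hneg]
      simp only [Bool.false_eq_true, false_iff]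
      intro H
      have := H (t + 1) (by omega) (by omega)
      unfold pvOk pvOkF pvOkB at this
      omega
    · rw [if_neg hneg]
      rw [ih (t + 1) (by omega) (by omega)]
      constructor
      · intro H m h1 h2
        rcases Nat.lt_or_ge (t + 1) m with h3 | h3
        · exact H m h3 h2
        · have : m = t + 1 := by omega
          subst this
          unfold pvOk pvOkF pvOkB
          omega
      · intro H m h1 h2
        exact H m (by omega) h2

theorem pvBal_swap (l : List Char) (o c : Char) (h : l.count o = l.count c) (k : Nat) :
    pvBal c o (l.drop k) = pvBal o c (l.take k) := by
  have h1 : l.count o = (l.take k).count o + (l.drop k).count o := by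
    rw [← List.count_append, List.take_append_drop]
  have h2 : l.count c = (l.take k).count c + (l.drop k).count c := by
    rw [← List.count_append, List.take_append_drop]
  unfold pvBal
  omega

theorem pvPosN_length (l : List Char) (x : Char) : (pvPosN l x).length = l.count x := by
  induction l with
  | nil => rfl
  | cons a t ih =>
    by_cases h : a = x <;> simp [pvPosN, h, ih, List.count_cons] <;> simp [Ne.symm h]

theorem pvPosN_pairwise (l : List Char) (x : Char) : (pvPosN l x).Pairwise (· < ·) := by
  induction l with
  | nil => exact List.Pairwise.nil
  | cons a t ih =>
    have hm : ((pvPosN t x).map (· + 1)).Pairwise (· < ·) := by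
      refine List.pairwise_map.mpr ?_
      exact ih.imp (by omega)
    by_cases h : a = x
    · simp only [pvPosN, h, if_pos rfl, List.singleton_append]
      refine List.pairwise_cons.mpr ⟨?_, hm⟩
      intro b hb
      rcases List.mem_map.mp hb with ⟨y, _, rfl⟩
      omega
    · simpa [pvPosN, h] using hm

theorem pvPosN_mem (l : List Char) (x : Char) (i : Nat) (hi : i ∈ pvPosN l x) :
    ∃ h : i < l.length, l[i] = x := by
  induction l generalizing i with
  | nil => simp [pvPosN] at hi
  | cons a t ih =>
    rw [pvPosN] at hi
    by_cases h : a = x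
    · rw [if_pos h, List.singleton_append, List.mem_cons] at hi
      rcases hi with rfl | hi
      · exact ⟨by simp, h⟩
      · rcases List.mem_map.mp hi with ⟨y, hy, rfl⟩
        rcases ih y hy with ⟨hlt, he⟩
        exact ⟨by simpa using Nat.succ_lt_succ hlt, by simpa using he⟩
    · rw [if_neg h, List.nil_append] at hi
      rcases List.mem_map.mp hi with ⟨y, hy, rfl⟩
      rcases ih y hy with ⟨hlt, he⟩
      exact ⟨by simpa using Nat.succ_lt_succ hlt, by simpa using he⟩

theorem pvPosN_countTake (l : List Char) (x : Char) :
    ∀ m, (l.take m).count x = ((pvPosN l x).filter (fun i => decide (i < m))).length := by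
  induction l with
  | nil => intro m; simp [pvPosN]
  | cons a t ih =>
    intro m
    cases m with
    | zero => simp
    | succ m =>
      have hmap : ((pvPosN t x).map (· + 1)).filter (fun i => decide (i < m + 1))
          = ((pvPosN t x).filter (fun i => decide (i < m))).map (· + 1) := by
        rw [List.filter_map]
        refine congrArg _ (List.filter_congr ?_)
        intro y _
        simp
      rw [List.take_succ_cons, pvPosN]
      by_cases h : a = x
      · rw [if_pos h, List.singleton_append,
          List.filter_cons_of_pos (by simp), hmap]
        simp [List.count_cons, h, ih m]
      · rw [if_neg h, List.nil_append, hmap]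
        simp [List.count_cons, Ne.symm h, ih m]
        exact h

theorem pvFiltLen (s : List Nat) (hs : s.Pairwise (· < ·)) (m k : Nat) :
    k < (s.filter (fun i => decide (i < m))).length ↔ ∃ h : k < s.length, s[k]'h < m := by
  induction s generalizing k with
  | nil => simp
  | cons a t ih =>
    have ht : t.Pairwise (· < ·) := (List.pairwise_cons.mp hs).2
    have hgt : ∀ b ∈ t, a < b := (List.pairwise_cons.mp hs).1
    by_cases ha : a < m
    · rw [List.filter_cons_of_pos (by simpa using ha)]
      cases k with
      | zero => simpa using ha
      | succ k =>
        have hih := ih ht k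
        constructor
        · intro hk
          rcases hih.mp (by simpa using hk) with ⟨h3, h4⟩
          exact ⟨by simpa using Nat.succ_lt_succ h3, by simpa using h4⟩
        · rintro ⟨h3, h4⟩
          have h5 : k < t.length := by simpa using h3
          have h6 : t[k]'h5 < m := by simpa using h4
          simpa using Nat.succ_lt_succ (hih.mpr ⟨h5, h6⟩)
    · rw [List.filter_cons_of_neg (by simpa using ha)]
      have hnil : t.filter (fun i => decide (i < m)) = [] := by
        rw [List.filter_eq_nil_iff]
        intro b hb
        have := hgt b hb
        simp; omega
      rw [hnil]
      simp only [List.length_nil, Nat.not_lt_zero, false_iff]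
      rintro ⟨hk, hlt⟩
      cases k with
      | zero => simp at hlt; omega
      | succ k =>
        have h5 : k < t.length := by simpa using hk
        have hmem : t[k]'h5 ∈ t := List.getElem_mem h5
        have := hgt _ hmem
        simp at hlt
        omega

theorem pvZipChar (O C : List Nat) (hlen : O.length = C.length)
    (hO : O.Pairwise (· < ·)) (hC : C.Pairwise (· < ·))
    (hne : ∀ k (h1 : k < O.length) (h2 : k < C.length), O[k]'h1 ≠ C[k]'h2) :
    (∀ m, ((C.filter (fun i => decide (i < m))).length ≤ (O.filter (fun i => decide (i < m))).length))
      ↔ ∀ k (h : k < O.length), O[k]'h < C[k]'(hlen ▸ h) := by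
  constructor
  · intro H k hk
    by_contra hcon
    push_neg at hcon
    have hkc : k < C.length := hlen ▸ hk
    have hne' := hne k hk hkc
    have hlt : C[k]'hkc < O[k]'hk := by omega
    set m := C[k]'hkc + 1 with hm
    have hCf : k < (C.filter (fun i => decide (i < m))).length :=
      (pvFiltLen C hC m k).mpr ⟨hkc, by omega⟩
    have hOf : ¬ k < (O.filter (fun i => decide (i < m))).length := by
      rw [pvFiltLen O hO m k]
      rintro ⟨_, hlt2⟩
      omega
    have := H m
    omega
  · intro H m
    by_contra hcon
    push_neg at hcon
    set a := (O.filter (fun i => decide (i < m))).length with ha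
    have haC : a < (C.filter (fun i => decide (i < m))).length := hcon
    have hCle : (C.filter (fun i => decide (i < m))).length ≤ C.length :=
      List.length_filter_le _ _
    have haCl : a < C.length := by omega
    have hCa : C[a]'haCl < m := ((pvFiltLen C hC m a).mp haC).2
    have haO : a < O.length := hlen ▸ haCl
    have hOge : ¬ (∃ h : a < O.length, O[a]'h < m) := by
      intro hx
      exact (by rw [ha] at *; exact lt_irrefl _ ((pvFiltLen O hO m a).mpr hx))
    push_neg at hOge
    have h1 := hOge haO
    have h2 := H a haO
    omega

-- the position dictionary of B returns exactly pvPosN (cast to Int), start index generalised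
theorem pvDict_getD_aux (l : List Char) :
    ∀ (s : Int) (d : PySem.Dict Char (List Int)) (x : Char),
    ((PySem.List.enumerate l s).foldl pvB_posIns d).getD x []
      = d.getD x [] ++ (pvPosN l x).map (fun i : Nat => s + (i : Int)) := by
  induction l with
  | nil => intro s d x; simp [PySem.List.enumerate_nil, pvPosN]
  | cons a t ih =>
    intro s d x
    rw [PySem.List.enumerate_cons, List.foldl_cons]
    rw [ih (s + 1) (pvB_posIns d (s, a)) x]
    have hins : (pvB_posIns d (s, a)).getD x []
        = if x = a then d.getD a [] ++ [s] else d.getD x [] := by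
      unfold pvB_posIns
      rw [PySem.Dict.getD_insert]
    have hmap : ((pvPosN t x).map (· + 1)).map (fun i : Nat => s + (i : Int))
        = (pvPosN t x).map (fun i : Nat => (s + 1) + (i : Int)) := by
      rw [List.map_map]
      apply List.map_congr_left
      intro i _
      simp only [Function.comp_apply]
      push_cast
      ring
    rw [pvPosN]
    by_cases h : a = x
    · rw [if_pos h, List.singleton_append, List.map_cons, hins, if_pos h.symm, h]
      rw [← hmap]
      simp
    · rw [if_neg h, List.nil_append, hins, if_neg (Ne.symm h), ← hmap]

theorem pvDict_getD (l : List Char) (x : Char) :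
    ((PySem.List.enumerate l 0).foldl pvB_posIns PySem.Dict.empty).getD x []
      = (pvPosN l x).map (fun i : Nat => (i : Int)) := by
  rw [pvDict_getD_aux l 0 PySem.Dict.empty x]
  rw [PySem.Dict.getD_empty, List.nil_append]
  apply List.map_congr_left
  intro i _
  simp

-- B's zip check on the Int position lists, rephrased over the Nat lists
theorem pvB_bad_eq (O C : List Nat) :
    pvB_bad (O.map (fun i : Nat => (i : Int))) (C.map (fun i : Nat => (i : Int)))
      = (O.zip C).any (fun q => decide (q.2 < q.1)) := by
  unfold pvB_bad
  rw [List.zip_map, List.any_map]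
  exact List.any_congr rfl (fun q => by simp [Prod.map])

theorem pvB_bad_false_iff (O C : List Nat) (hlen : O.length = C.length)
    (hne : ∀ k (h1 : k < O.length) (h2 : k < C.length), O[k] ≠ C[k]) :
    ((O.zip C).any (fun q => decide (q.2 < q.1)) = false)
      ↔ ∀ k (h : k < O.length), O[k] < C[k]'(hlen ▸ h) := by
  rw [← Bool.not_eq_true, List.any_eq_true]
  constructor
  · intro H k hk
    have hkc : k < C.length := hlen ▸ hk
    have hmem : (O[k], C[k]) ∈ O.zip C := by
      have : (O.zip C)[k]'(by rw [List.length_zip]; omega) = (O[k], C[k]) := by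
        simp [List.getElem_zip]
      rw [← this]
      exact List.getElem_mem _
    have hnot : ¬ C[k] < O[k] := by
      intro hlt
      exact H ⟨(O[k], C[k]), hmem, by simpa using hlt⟩
    have := hne k hk hkc
    omega
  · rintro H ⟨q, hq, hlt⟩
    rcases List.mem_iff_getElem.mp hq with ⟨k, hk, rfl⟩
    have hkO : k < O.length := by rw [List.length_zip] at hk; omega
    have := H k hkO
    rw [List.getElem_zip] at hlt
    simp at hlt
    omega

-- per bracket type: forward prefix balances nonnegative ⟺ positional zip check passes
theorem pvType_iff (l : List Char) (o c : Char) (hoc : o ≠ c) (hcount : l.count o = l.count c) :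
    ((pvPosN l o).zip (pvPosN l c)).any (fun q => decide (q.2 < q.1)) = false
      ↔ ∀ m, 0 ≤ pvBal o c (l.take m) := by
  have hlen : (pvPosN l o).length = (pvPosN l c).length := by
    rw [pvPosN_length, pvPosN_length, hcount]
  have hne : ∀ k (h1 : k < (pvPosN l o).length) (h2 : k < (pvPosN l c).length),
      (pvPosN l o)[k] ≠ (pvPosN l c)[k] := by
    intro k h1 h2 heq
    rcases pvPosN_mem l o _ (List.getElem_mem h1) with ⟨hi, hio⟩
    rcases pvPosN_mem l c _ (List.getElem_mem h2) with ⟨hj, hjc⟩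
    apply hoc
    rw [← hio, ← hjc]
    congr 1
  rw [pvB_bad_false_iff _ _ hlen hne]
  rw [← pvZipChar _ _ hlen (pvPosN_pairwise l o) (pvPosN_pairwise l c) hne]
  unfold pvBal
  constructor
  · intro H m
    have := H m
    rw [pvPosN_countTake l o m, pvPosN_countTake l c m]
    omega
  · intro H m
    have := H m
    rw [pvPosN_countTake l o m, pvPosN_countTake l c m] at this
    omega

-- with equal per-type totals, A's dual scan equals B's three positional checks
theorem pvLoops_eq (l : List Char) (hp : l.count '(' = l.count ')')
    (hb : l.count '[' = l.count ']') (hc : l.count '<' = l.count '>') :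
    pvA_loop l l.length 0 0 0 0 0 0 0
      = (!((pvPosN l '(').zip (pvPosN l ')')).any (fun q => decide (q.2 < q.1))
        && !((pvPosN l '[').zip (pvPosN l ']')).any (fun q => decide (q.2 < q.1))
        && !((pvPosN l '<').zip (pvPosN l '>')).any (fun q => decide (q.2 < q.1))) := by
  have hA := pvA_loop_iff_aux l l.length 0 (by omega) (by omega)
  simp only [List.take_zero, Nat.sub_zero, List.drop_length] at hA
  simp only [show ∀ o c, pvBal o c ([] : List Char) = 0 from fun o c => by simp [pvBal]] at hA
  have h1 := pvType_iff l '(' ')' (by decide) hp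
  have h2 := pvType_iff l '[' ']' (by decide) hb
  have h3 := pvType_iff l '<' '>' (by decide) hc
  rw [Bool.eq_iff_iff]
  simp only [Bool.and_eq_true, Bool.not_eq_true']
  rw [hA, h1, h2, h3]
  constructor
  · intro H
    refine ⟨⟨fun m => ?_, fun m => ?_⟩, fun m => ?_⟩ <;>
    · rcases Nat.eq_zero_or_pos m with rfl | hm
      · simp [pvBal]
      · rcases Nat.lt_or_ge l.length m with hgt | hle
        · rcases Nat.eq_zero_or_pos l.length with h0 | h0
          · have : l = [] := List.length_eq_zero_iff.mp h0
            subst this; simp [pvBal]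
          · have := (H l.length h0 (le_refl _)).1
            unfold pvOkF at this
            rw [List.take_of_length_le (by omega)]
            rw [List.take_length] at this
            omega
        · have := (H m hm hle).1
          unfold pvOkF at this; omega
  · rintro ⟨⟨H1, H2⟩, H3⟩ m hm hle
    refine ⟨⟨(H1 m), (H2 m), (H3 m)⟩, ?_, ?_, ?_⟩ <;>
      rw [pvBal_swap l _ _ (by assumption) (l.length - m)]
    · exact H1 _
    · exact H2 _
    · exact H3 _

-- length of the stripped string in terms of counts
theorem pvStrip_length (l : List Char) :
    (pvA_strip l).length + l.count '&' + l.count '_' = l.length := by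
  induction l with
  | nil => rfl
  | cons a l ih =>
    by_cases h1 : a = '&' <;> by_cases h2 : a = '_' <;>
      simp [pvA_strip, h1, h2] at * <;> omega

theorem pvStrip_count_dot (l : List Char) :
    (pvA_strip l).count '.' = l.count '.' := by
  induction l with
  | nil => rfl
  | cons a l ih =>
    by_cases h1 : a = '&' <;> by_cases h2 : a = '_' <;> by_cases h3 : a = '.' <;>
      simp [pvA_strip, h1, h2, h3] at *

theorem pvLast_eq (l : List Char) : PySem.List.pyGetD l (-1) ' ' = l.getD (l.length - 1) ' ' := by
  cases l with
  | nil => rfl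
  | cons a l =>
    rw [PySem.List.pyGetD_neg_one (xs := a :: l) (h := by simp)]
    rw [List.getLast_eq_getElem]
    rw [List.getD_eq_getElem (hn := by simp)]
    rfl

theorem valid_motif_eq (struct : String) (pseudoknot : Bool) :
    valid_motif struct pseudoknot = valid_motif_alt struct pseudoknot := by
  unfold valid_motif valid_motif_alt
  generalize struct.toList = l
  simp only [pvDict_getD, List.length_map, pvPosN_length]
  have hstrip := pvStrip_length l
  have hdot := pvStrip_count_dot l
  have hdle := List.count_le_length (a := '.') (l := pvA_strip l)
  -- guard 1
  have e1 : (pseudoknot = false ∧ 2 ≤ (if 0 < ((l.count '(' : Int)) then (1 : Int) else 0)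
        + (if 0 < ((l.count '[' : Int)) then 1 else 0) + (if 0 < ((l.count '<' : Int)) then 1 else 0))
      ↔ (pseudoknot = false ∧ (('(' ∈ l ∧ '[' ∈ l) ∨ ('(' ∈ l ∧ '<' ∈ l) ∨ ('[' ∈ l ∧ '<' ∈ l))) := by
    apply and_congr_right; intro _
    by_cases h1 : '(' ∈ l <;> by_cases h2 : '[' ∈ l <;> by_cases h3 : '<' ∈ l <;>
      simp [h1, h2, h3, Int.natCast_pos, List.count_pos_iff]
  -- guard 2
  have e2' : ((pvA_strip l).all (fun c => c == '.') = true) ↔ (pvA_strip l).count '.' = (pvA_strip l).length := by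
    simp only [List.all_eq_true, beq_iff_eq, List.count_eq_length]
    exact ⟨fun h b hb => (h b hb).symm, fun h b hb => (h b hb).symm⟩
  have e2 : ((l.count '.' : Int) = (l.length : Int) - ((l.count '&' : Int) + (l.count '_' : Int)))
      ↔ ((pvA_strip l).all (fun c => c == '.') = true) := by
    rw [e2']
    omega
  -- guard 3
  have e3 : (l.getD 0 ' ' = '&' ∨ PySem.List.pyGetD l (-1) ' ' = '&')
      ↔ (l.getD 0 ' ' = '&' ∨ l.getD (l.length - 1) ' ' = '&') := by
    rw [pvLast_eq]
  -- guard 4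
  have e4 : ((l.length : Int) - ((l.count '&' : Int) + (l.count '_' : Int)) ≤ 3)
      ↔ ((pvA_strip l).length ≤ 3) := by omega
  -- guard 5
  have e5 : (0 < (l.count '&' : Int) + (l.count '_' : Int)
        ∧ (l.length : Int) - ((l.count '&' : Int) + (l.count '_' : Int)) < 3 * ((l.count '&' : Int) + (l.count '_' : Int)))
      ↔ (('&' ∈ l ∨ '_' ∈ l) ∧ (pvA_strip l).length < 3 * (l.count '&' + l.count '_')) := by
    constructor
    · rintro ⟨ha, hb⟩
      refine ⟨?_, by omega⟩
      by_contra hno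
      have c1 : l.count '&' = 0 := List.count_eq_zero.mpr (fun h => hno (Or.inl h))
      have c2 : l.count '_' = 0 := List.count_eq_zero.mpr (fun h => hno (Or.inr h))
      omega
    · rintro ⟨ha, hb⟩
      have : 0 < l.count '&' + l.count '_' := by
        rcases ha with ha | ha <;> have := List.count_pos_iff.mpr ha <;> omega
      omega
  -- guard 6
  have e6 : (((l.count '(' : Int)) ≠ ((l.count ')' : Int)) ∨ ((l.count '[' : Int)) ≠ ((l.count ']' : Int))
        ∨ ((l.count '<' : Int)) ≠ ((l.count '>' : Int))
        ∨ (l.count '(' : Int) + (l.count '[' : Int) + (l.count '<' : Int) = 1)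
      ↔ ((l.count '(' ≠ l.count ')' ∨ l.count '[' ≠ l.count ']' ∨ l.count '<' ≠ l.count '>')
        ∨ (l.count '(' + l.count '[' + l.count '<' = 1)) := by
    omega
  by_cases h1 : pseudoknot = false ∧ (('(' ∈ l ∧ '[' ∈ l) ∨ ('(' ∈ l ∧ '<' ∈ l) ∨ ('[' ∈ l ∧ '<' ∈ l))
  · rw [if_pos h1, if_pos (e1.mpr h1)]
  rw [if_neg h1, if_neg (fun hh => h1 (e1.mp hh))]
  by_cases h2 : (pvA_strip l).all (fun c => c == '.') = true
  · rw [if_pos h2, if_pos (e2.mpr h2)]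
  rw [if_neg h2, if_neg (fun hh => h2 (e2.mp hh))]
  by_cases h3 : l.getD 0 ' ' = '&' ∨ l.getD (l.length - 1) ' ' = '&'
  · rw [if_pos h3, if_pos (e3.mpr h3)]
  rw [if_neg h3, if_neg (fun hh => h3 (e3.mp hh))]
  by_cases h4 : (pvA_strip l).length ≤ 3
  · rw [if_pos h4, if_pos (e4.mpr h4)]
  rw [if_neg h4, if_neg (fun hh => h4 (e4.mp hh))]
  by_cases h5 : ('&' ∈ l ∨ '_' ∈ l) ∧ (pvA_strip l).length < 3 * (l.count '&' + l.count '_')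
  · rw [if_pos h5, if_pos (e5.mpr h5)]
  rw [if_neg h5, if_neg (fun hh => h5 (e5.mp hh))]
  by_cases h6 : (l.count '(' ≠ l.count ')' ∨ l.count '[' ≠ l.count ']' ∨ l.count '<' ≠ l.count '>')
      ∨ (l.count '(' + l.count '[' + l.count '<' = 1)
  · rw [if_pos h6, if_pos (e6.mpr h6)]
  rw [if_neg h6, if_neg (fun hh => h6 (e6.mp hh))]
  have hp : l.count '(' = l.count ')' := by
    by_contra hcn; exact h6 (Or.inl (Or.inl hcn))
  have hb : l.count '[' = l.count ']' := by
    by_contra hcn; exact h6 (Or.inl (Or.inr (Or.inl hcn)))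
  have hc' : l.count '<' = l.count '>' := by
    by_contra hcn; exact h6 (Or.inl (Or.inr (Or.inr hcn)))
  rw [pvLoops_eq l hp hb hc']
  simp only [pvB_bad_eq]
  rcases hB1 : ((pvPosN l '(').zip (pvPosN l ')')).any (fun q => decide (q.2 < q.1)) <;>
    rcases hB2 : ((pvPosN l '[').zip (pvPosN l ']')).any (fun q => decide (q.2 < q.1)) <;>
    rcases hB3 : ((pvPosN l '<').zip (pvPosN l '>')).any (fun q => decide (q.2 < q.1)) <;>
    simp

-- ===== VERDICT (by name: the statement is the Claim_ definition above) =====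
theorem valid_motif_spec : Claim_equal_valid_motif := by
  intro struct pseudoknot _
  unfold Spec_valid_motif
  exact valid_motif_eq struct pseudoknot
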